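-- pv_equiv track=rewrite | github.com/thotalakshmimounika/IntermediateDSA | Hashing/Frequency of element query.py | solve
-- ===== SOURCE A (Python) =====
-- def solve(a,b):
--     feq_dic=dict()
--     for i in a:
--         if i in feq_dic:
--             feq_dic[i]+=1
--         else:
--             feq_dic[i]=1
--     c=[]
--     for i in b:
--         if i in feq_dic:
--             c.append(feq_dic[i])
--         else:
--             c.append(0)
--     return c
-- ===== SOURCE B (Python) =====
-- def solve(a, b):
--     # Data-driven scatter: one counter per query slot, updated while scanning a once.
--     res = [0] * len(b)
--     for x in a:
--         res = [r + 1 if y == x else r for y, r in zip(b, res)]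
--     return res
-- ===== Notes on version B (the rewrite author's own statement) =====
-- stated objective: alternative
-- what changed: Inverts the data flow: instead of building a frequency dict over a and then looking up each query, B keeps one counter per query slot of b and scatters each element of a into the matching slots in a single pass over a, with no auxiliary index.
import Mathlib
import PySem

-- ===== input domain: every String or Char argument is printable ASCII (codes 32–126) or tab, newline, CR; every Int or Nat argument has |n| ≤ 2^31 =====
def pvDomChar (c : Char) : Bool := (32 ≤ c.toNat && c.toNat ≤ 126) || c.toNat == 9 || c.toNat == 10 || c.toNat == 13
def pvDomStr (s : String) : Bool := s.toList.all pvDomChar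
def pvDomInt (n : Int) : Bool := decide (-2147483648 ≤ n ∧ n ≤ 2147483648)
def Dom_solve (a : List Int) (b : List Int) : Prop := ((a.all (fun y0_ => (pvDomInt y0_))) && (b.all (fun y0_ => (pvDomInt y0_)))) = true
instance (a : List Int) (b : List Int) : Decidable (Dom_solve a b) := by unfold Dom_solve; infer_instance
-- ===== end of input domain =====

-- B inverts A's data flow: no frequency dict over a; it keeps one counter per query slot of b
-- and scatters each element of a into the matching slots in a single pass over a (alternative; not faster).

-- ===== PORT A =====
def solve (a : List Int) (b : List Int) : List Int :=
  -- first loop: build feq_dic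
  let feq_dic : PySem.Dict Int Int :=
    a.foldl (fun d i => if d.contains i then d.modify i 0 (· + 1) else d.insert i 1)
      PySem.Dict.empty
  -- second loop: build c (feq_dic[i] is guarded by 'i in feq_dic', so it never raises)
  b.foldl (fun c i => c ++ [if feq_dic.contains i then feq_dic.getD i 0 else 0]) []

-- ===== PORT B =====
def solve_alt (a : List Int) (b : List Int) : List Int :=
  -- res = [0] * len(b); for x in a: res = [r + 1 if y == x else r for y, r in zip(b, res)]
  a.foldl (fun res x => List.zipWith (fun y r => if y = x then r + 1 else r) b res)
    (List.replicate b.length (0 : Int))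

-- ===== PRECONDITION & SPEC =====
def Spec_solve (a : List Int) (b : List Int) (out : List Int) : Prop := out = solve_alt a b
instance (a : List Int) (b : List Int) (out : List Int) : Decidable (Spec_solve a b out) := by unfold Spec_solve; infer_instance

-- ===== CLAIM (what is proved, stated in full; the proofs are below) =====
def Claim_equal_solve : Prop := ∀ (a : List Int) (b : List Int), Dom_solve a b → Spec_solve a b (solve a b)

-- ===== LEMMAS AND PROOFS =====

-- Invariant of A's first loop: the folded dict counts occurrences on top of the initial dict.
theorem solve_dict_invariant (a : List Int) (d : PySem.Dict Int Int) (k : Int) :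
    (a.foldl (fun d i => if d.contains i then d.modify i 0 (· + 1) else d.insert i 1) d).getD k 0
      = d.getD k 0 + (a.count k : Int) := by
  induction a generalizing d with
  | nil => simp
  | cons i a ih =>
    simp only [List.foldl_cons, ih, List.count_cons]
    by_cases hc : d.contains i = true
    · rw [if_pos hc, PySem.Dict.getD_modify]
      by_cases hk : k = i <;> simp [hk] <;> omega
    · rw [if_neg hc, PySem.Dict.getD_insert]
      by_cases hk : k = i
      · subst hk
        rw [PySem.Dict.getD_of_not_contains d (0 : Int) (by simpa using hc)]
        simp
        ring
      · simp [hk, beq_iff_eq, Ne.symm hk]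

-- Each query's value in A equals a.count.
theorem solve_query_eq (a : List Int) (i : Int) :
    (let fd : PySem.Dict Int Int :=
        a.foldl (fun d i => if d.contains i then d.modify i 0 (· + 1) else d.insert i 1)
          PySem.Dict.empty
     if fd.contains i then fd.getD i 0 else 0) = (a.count i : Int) := by
  show (if _ then (_ : PySem.Dict Int Int).getD i 0 else 0) = _
  set fd : PySem.Dict Int Int :=
      a.foldl (fun d i => if d.contains i then d.modify i 0 (· + 1) else d.insert i 1)
        PySem.Dict.empty with hfd
  have hg : fd.getD i 0 = (a.count i : Int) := by
    rw [hfd, solve_dict_invariant]; simp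
  by_cases hc : fd.contains i = true
  · rw [if_pos hc]; exact hg
  · rw [if_neg hc]
    rw [PySem.Dict.getD_of_not_contains fd (0 : Int) (by simpa using hc)] at hg
    exact hg

-- A's result, characterised: the count of each query.
theorem solve_eq_map_count (a : List Int) (b : List Int) :
    solve a b = b.map (fun i => (a.count i : Int)) := by
  unfold solve
  rw [PySem.List.foldl_append_singleton_eq_map]
  simp only [List.nil_append]
  exact List.map_congr_left (fun i _ => solve_query_eq a i)

-- One scatter step over a counter vector of the shape b.map f stays of that shape.
theorem solve_alt_step (b : List Int) (f : Int → Int) (x : Int) :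
    List.zipWith (fun y r => if y = x then r + 1 else r) b (b.map f)
      = b.map (fun y => if y = x then f y + 1 else f y) := by
  induction b with
  | nil => simp
  | cons y b ih => simp [ih]

-- Invariant of B's loop: folding a over a vector b.map f adds the count of each query.
theorem solve_alt_invariant (a : List Int) (b : List Int) (f : Int → Int) :
    a.foldl (fun res x => List.zipWith (fun y r => if y = x then r + 1 else r) b res)
        (b.map f)
      = b.map (fun y => f y + (a.count y : Int)) := by
  induction a generalizing f with
  | nil => simp
  | cons x a ih =>
    rw [List.foldl_cons, solve_alt_step, ih]
    refine List.map_congr_left (fun y _ => ?_)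
    simp only [List.count_cons]
    by_cases h : y = x <;> simp [h] <;> omega

-- B's result, characterised the same way.
theorem solve_alt_eq_map_count (a : List Int) (b : List Int) :
    solve_alt a b = b.map (fun i => (a.count i : Int)) := by
  unfold solve_alt
  have h0 : List.replicate b.length (0 : Int) = b.map (fun _ => (0 : Int)) := by
    simp [List.map_const']
  rw [h0, solve_alt_invariant]
  simp

-- ===== VERDICT (by name: the statement is the Claim_ definition above) =====
theorem solve_spec : Claim_equal_solve := by
  intro a b _
  unfold Spec_solve
  rw [solve_eq_map_count, solve_alt_eq_map_count]
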